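-- pv_equiv track=rewrite | github.com/Tiago-Goncalves98/Connect-N | controllers/gamerules.py | count_NW_UP
-- ===== SOURCE A (Python) =====
-- def count_NW_UP(game,x,y,count=1):
--     final_count = count
--     for i in range(y-1,y+2):
--         for j in range(x-1,x+2):
--             if 0 <= i < len(game["currentGame"]) and 0 <= j < len(game["currentGame"][0]) and (i == y-1 and j == x-1) and game["currentGame"][i][j] == game["currentGame"][y][x]:
--                 final_count += 1
--                 return count_NW_UP(game,j,i,final_count)
--     return final_count
-- ===== SOURCE B (Python) =====
-- def count_NW_UP(game, x, y, count=1):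
--     final_count = count
--     while (0 <= y-1 < len(game["currentGame"])
--            and 0 <= x-1 < len(game["currentGame"][0])
--            and game["currentGame"][y-1][x-1] == game["currentGame"][y][x]):
--         final_count += 1
--         x -= 1
--         y -= 1
--     return final_count
-- ===== Notes on version B (the rewrite author's own statement) =====
-- stated objective: simpler
-- what changed: Replaced A's tail recursion wrapped in dummy 3x3 range loops (of which only the (y-1,x-1) cell can ever fire) by a single while loop that walks the NW-up diagonal with the same short-circuit bounds checks, accumulating final_count in place.
import Mathlib
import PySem

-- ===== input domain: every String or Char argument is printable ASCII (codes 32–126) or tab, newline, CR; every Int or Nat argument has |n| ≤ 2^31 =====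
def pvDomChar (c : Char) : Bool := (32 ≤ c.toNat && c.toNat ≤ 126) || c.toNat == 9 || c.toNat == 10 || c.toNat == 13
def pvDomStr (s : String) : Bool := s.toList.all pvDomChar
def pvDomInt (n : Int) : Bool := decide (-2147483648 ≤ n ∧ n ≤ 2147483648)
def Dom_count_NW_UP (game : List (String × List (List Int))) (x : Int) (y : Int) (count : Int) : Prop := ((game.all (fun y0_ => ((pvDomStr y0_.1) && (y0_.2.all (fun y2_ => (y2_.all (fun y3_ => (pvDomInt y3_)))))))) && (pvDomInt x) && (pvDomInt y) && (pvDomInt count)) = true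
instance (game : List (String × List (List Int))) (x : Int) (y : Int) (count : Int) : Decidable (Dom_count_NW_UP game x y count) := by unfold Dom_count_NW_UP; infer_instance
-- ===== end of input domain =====

-- B replaces A's tail recursion inside dummy 3x3 loops by one while loop along the NW-up diagonal (same values, different decomposition).


-- shared helper: game["currentGame"] (Pre_ guarantees the key is present; [] is never read inside Pre_)
def pvGrid (game : List (String × List (List Int))) : List (List Int) :=
  ((game.find? (fun p => p.1 == "currentGame")).map (fun p => p.2)).getD []

-- grid[i][j] (Pre_ guarantees every evaluated access is in range; 0 is never read inside Pre_)
def pvCell (grid : List (List Int)) (i j : Int) : Int :=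
  ((PySem.List.pyGet? ((PySem.List.pyGet? grid i).getD []) j).getD 0)

-- ===== PORT A =====
-- the full 'if' condition of A's inner loop body, for loop variables i, j
def nwCond (grid : List (List Int)) (y x i j : Int) : Bool :=
  decide (0 ≤ i) && decide (i < (grid.length : Int)) &&
  decide (0 ≤ j) && decide (j < ((((PySem.List.pyGet? grid 0).getD []).length : Int))) &&
  (i == y - 1) && (j == x - 1) &&
  (pvCell grid i j == pvCell grid y x)

-- A: the nested 'for i … for j …' returning at the first (i, j) whose condition holds = find? over the 3x3 index pairs
def count_NW_UP (game : List (String × List (List Int))) (x : Int) (y : Int) (count : Int) : Int :=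
  let grid := pvGrid game
  match h : List.find? (fun p => nwCond grid y x p.1 p.2)
      ((PySem.List.pyRange (y-1) (y+2) 1).flatMap
        (fun i => (PySem.List.pyRange (x-1) (x+2) 1).map (fun j => (i, j)))) with
  | some p => count_NW_UP game p.2 p.1 (count + 1)
  | none => count
termination_by y.toNat
decreasing_by
  have hp := List.find?_some h
  simp only [nwCond, Bool.and_eq_true, decide_eq_true_eq, beq_iff_eq] at hp
  omega

-- ===== PORT B =====
-- B's while-loop condition, in A's short-circuit order
def altCond (grid : List (List Int)) (x y : Int) : Bool :=
  decide (0 ≤ y - 1) && decide (y - 1 < (grid.length : Int)) &&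
  decide (0 ≤ x - 1) && decide (x - 1 < ((((PySem.List.pyGet? grid 0).getD []).length : Int))) &&
  (pvCell grid (y-1) (x-1) == pvCell grid y x)

-- the while loop: final_count accumulates, x and y step NW-up
def altGo (grid : List (List Int)) (x y fc : Int) : Int :=
  if altCond grid x y then altGo grid (x-1) (y-1) (fc+1) else fc
termination_by y.toNat
decreasing_by
  rename_i h
  simp only [altCond, Bool.and_eq_true, decide_eq_true_eq] at h
  omega

def count_NW_UP_alt (game : List (String × List (List Int))) (x : Int) (y : Int) (count : Int) : Int :=
  altGo (pvGrid game) x y count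

-- ===== PRECONDITION & SPEC =====
-- Pre_ holds exactly where the Python returns: it excludes the inputs on which A raises — a missing
-- "currentGame" key when the lazily-guarded len() is reached (KeyError, iff -1 <= y), and walks whose
-- cell accesses go out of range at a reached diagonal step, i.e. one whose guard holds and whose earlier
-- steps all had in-bounds guards and equal cells (IndexError).
def Pre_count_NW_UP (game : List (String × List (List Int))) (x : Int) (y : Int) (count : Int) : Prop :=
  (-1 ≤ y → (game.find? (fun p => p.1 == "currentGame")).isSome) ∧
  (∀ k : Nat, k < min y.toNat (pvGrid game).length →
    (((1 ≤ y - k ∧ y - k ≤ ((pvGrid game).length : Int) ∧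
       1 ≤ x - k ∧ x - k ≤ ((((PySem.List.pyGet? (pvGrid game) 0).getD []).length : Int))) ∧
      (∀ j : Nat, j < k →
        ((1 ≤ y - j ∧ y - j ≤ ((pvGrid game).length : Int) ∧
          1 ≤ x - j ∧ x - j ≤ ((((PySem.List.pyGet? (pvGrid game) 0).getD []).length : Int))) ∧
         pvCell (pvGrid game) (y - j - 1) (x - j - 1) = pvCell (pvGrid game) (y - j) (x - j)))) →
     (y - k < ((pvGrid game).length : Int) ∧
      x - k - 1 < ((((PySem.List.pyGet? (pvGrid game) (y - k - 1)).getD []).length : Int)) ∧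
      x - k < ((((PySem.List.pyGet? (pvGrid game) (y - k)).getD []).length : Int)))))
instance (game : List (String × List (List Int))) (x : Int) (y : Int) (count : Int) : Decidable (Pre_count_NW_UP game x y count) := by unfold Pre_count_NW_UP; infer_instance

def pvWitness_count_NW_UP : (List (String × List (List Int))) × Int × Int × Int :=
  ([("currentGame", [[1, 1], [2, 1]])], 1, 1, 1)

def Spec_count_NW_UP (game : List (String × List (List Int))) (x : Int) (y : Int) (count : Int) (out : Int) : Prop := out = count_NW_UP_alt game x y count
instance (game : List (String × List (List Int))) (x : Int) (y : Int) (count : Int) (out : Int) : Decidable (Spec_count_NW_UP game x y count out) := by unfold Spec_count_NW_UP; infer_instance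

-- ===== CLAIM (what is proved, stated in full; the proofs are below) =====
def Claim_equal_count_NW_UP : Prop := ∀ (game : List (String × List (List Int))) (x : Int) (y : Int) (count : Int), Dom_count_NW_UP game x y count → Pre_count_NW_UP game x y count → Spec_count_NW_UP game x y count (count_NW_UP game x y count)

-- ===== LEMMAS AND PROOFS =====

lemma range3 (a : Int) : PySem.List.pyRange a (a + 3) 1 = [a, a + 1, a + 2] := by
  rw [PySem.List.pyRange_one_cons (by omega), PySem.List.pyRange_one_cons (by omega),
      PySem.List.pyRange_one_cons (by omega), PySem.List.pyRange_one_eq_nil (by omega)]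
  norm_num [add_assoc]

lemma nwCond_target (grid : List (List Int)) (y x : Int) :
    nwCond grid y x (y - 1) (x - 1) = altCond grid x y := by
  simp [nwCond, altCond]

lemma nwCond_off (grid : List (List Int)) (y x i j : Int) (h : i ≠ y - 1 ∨ j ≠ x - 1) :
    nwCond grid y x i j = false := by
  simp only [nwCond, Bool.and_eq_false_iff]
  rcases h with h | h
  · left; left; right; simpa using h
  · left; right; simpa using h

lemma find_eq (grid : List (List Int)) (y x : Int) :
    List.find? (fun p => nwCond grid y x p.1 p.2)
      ((PySem.List.pyRange (y-1) (y+2) 1).flatMap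
        (fun i => (PySem.List.pyRange (x-1) (x+2) 1).map (fun j => (i, j)))) =
      (if altCond grid x y then some (y - 1, x - 1) else none) := by
  have hy : y + 2 = (y - 1) + 3 := by ring
  have hx : x + 2 = (x - 1) + 3 := by ring
  rw [hy, hx, range3, range3]
  simp only [List.flatMap_cons, List.flatMap_nil, List.map_cons, List.map_nil,
    List.append_nil, List.cons_append, List.nil_append]
  by_cases hc : altCond grid x y
  · rw [List.find?_cons_of_pos (by simpa [nwCond_target] using hc), if_pos hc]
  · rw [if_neg hc]
    refine List.find?_eq_none.mpr ?_
    rintro ⟨i, j⟩ hm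
    show ¬nwCond grid y x i j = true
    by_cases hij : i = y - 1 ∧ j = x - 1
    · obtain ⟨hi, hj⟩ := hij
      subst hi hj
      simp [nwCond_target, hc]
    · simp [nwCond_off grid y x i j (by tauto)]

-- A unfolds to the same one-step recurrence as B's loop
lemma A_unfold (game : List (String × List (List Int))) (x y count : Int) :
    count_NW_UP game x y count =
      (if altCond (pvGrid game) x y
       then count_NW_UP game (x - 1) (y - 1) (count + 1) else count) := by
  rw [count_NW_UP]
  split
  · rename_i p h
    rw [find_eq] at h
    by_cases hc : altCond (pvGrid game) x y
    · simp only [hc, if_true] at h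
      cases h
      simp [hc]
    · simp [hc] at h
  · rename_i h
    rw [find_eq] at h
    by_cases hc : altCond (pvGrid game) x y
    · simp [hc] at h
    · simp [hc]

lemma agree (game : List (String × List (List Int))) :
    ∀ (n : Nat) (y x count : Int), y.toNat ≤ n →
      count_NW_UP game x y count = altGo (pvGrid game) x y count := by
  intro n
  induction n with
  | zero =>
    intro y x count hy
    rw [A_unfold, altGo]
    by_cases hc : altCond (pvGrid game) x y
    · exfalso
      simp only [altCond, Bool.and_eq_true, decide_eq_true_eq] at hc
      omega
    · simp [hc]
  | succ n ih =>
    intro y x count hy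
    rw [A_unfold, altGo]
    by_cases hc : altCond (pvGrid game) x y
    · have hy1 : (y - 1).toNat ≤ n := by
        simp only [altCond, Bool.and_eq_true, decide_eq_true_eq] at hc
        omega
      simp [hc, ih (y - 1) (x - 1) (count + 1) hy1]
    · simp [hc]

-- ===== VERDICT (by name: the statement is the Claim_ definition above) =====
theorem count_NW_UP_spec : Claim_equal_count_NW_UP := by
  intro game x y count _ _
  unfold Spec_count_NW_UP count_NW_UP_alt
  exact agree game y.toNat y x count le_rfl
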